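-- pv_equiv track=rewrite | github.com/wllmrodr/LABS_-MC102- | tarefa_09/compras.py | analisa_disponibilidade
-- ===== SOURCE A (Python) =====
-- def analisa_disponibilidade(lista_prod_demanda, lista_prod_disponivel):
--     """
--     analisa as listas, procurando sequencialmente o determinado produto.
--     """
--     lista_final = []
--     lista_prod_demanda.sort()
--     lista_prod_disponivel.sort()
--
--     for x in lista_prod_demanda:
--         for y in lista_prod_disponivel:
--            if x == y:
--                lista_prod_disponivel.remove(y)
--                break
--
--         else:
--             lista_final.append(x)
--
--
--     return lista_final
-- ===== SOURCE B (Python) =====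
-- def analisa_disponibilidade(lista_prod_demanda, lista_prod_disponivel):
--     """
--     Sorts both lists (in place, like the original), then computes the
--     missing demanded products with a single two-pointer merge pass.
--     Note: unlike the original, matched items are not removed from
--     lista_prod_disponivel (return value is identical).
--     """
--     lista_prod_demanda.sort()
--     lista_prod_disponivel.sort()
--     res = []
--     i = j = 0
--     n, m = len(lista_prod_demanda), len(lista_prod_disponivel)
--     while i < n and j < m:
--         d, a = lista_prod_demanda[i], lista_prod_disponivel[j]
--         if d < a:
--             res.append(d)
--             i += 1
--         elif d == a:
--             i += 1
--             j += 1
--         else: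
--             j += 1
--     res.extend(lista_prod_demanda[i:])
--     return res
-- ===== Notes on version B (the rewrite author's own statement) =====
-- stated objective: faster
-- what changed: Replaces the nested scan-and-remove over the available list with a single linear two-pointer merge over the two sorted lists.
import Mathlib
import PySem

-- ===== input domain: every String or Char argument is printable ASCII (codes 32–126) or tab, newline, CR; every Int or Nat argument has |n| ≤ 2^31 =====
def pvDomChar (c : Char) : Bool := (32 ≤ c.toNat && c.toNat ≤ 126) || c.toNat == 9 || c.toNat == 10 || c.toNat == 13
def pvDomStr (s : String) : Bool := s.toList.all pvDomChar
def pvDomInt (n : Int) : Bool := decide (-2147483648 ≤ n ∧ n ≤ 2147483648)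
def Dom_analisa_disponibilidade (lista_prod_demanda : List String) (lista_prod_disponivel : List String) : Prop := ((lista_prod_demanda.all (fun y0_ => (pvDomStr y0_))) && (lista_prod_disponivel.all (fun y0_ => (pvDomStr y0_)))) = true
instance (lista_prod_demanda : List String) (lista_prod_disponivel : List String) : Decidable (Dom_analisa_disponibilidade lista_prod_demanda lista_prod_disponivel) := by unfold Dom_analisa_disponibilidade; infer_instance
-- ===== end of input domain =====

-- B replaces A's nested scan+remove with one linear two-pointer merge over the
-- two sorted lists (faster); return values agree everywhere. A mutates both
-- argument lists (sorts them, removes matched items from the available list);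
-- B sorts both in place but does not remove — the equivalence proved here is
-- about the RETURN value only.

-- ===== PORT A =====
-- The inner `for y … if x == y: remove(y); break / else: append(x)` finds the
-- first y equal to x and removes exactly that occurrence, i.e. list.remove(x)
-- when x is present and the else-branch when it is not: PySem.List.remove?
-- returns none exactly when x is absent (exact).
def analisa_disponibilidade (lista_prod_demanda : List String) (lista_prod_disponivel : List String) : List String :=
  let dem := PySem.List.sorted lista_prod_demanda (fun x => x) false
  let disp := PySem.List.sorted lista_prod_disponivel (fun x => x) false
  (dem.foldl (fun (st : List String × List String) x =>
      match PySem.List.remove? st.1 x with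
      | some disp' => (disp', st.2)
      | none => (st.1, st.2 ++ [x])) (disp, ([] : List String))).2

-- ===== PORT B =====
-- Source B's index-based while loop over the two sorted lists, transcribed as the
-- same two-pointer recursion on the list suffixes; the final
-- `res.extend(lista_prod_demanda[i:])` is the `d :: ds` base case.
def pvMerge : List String → List String → List String
  | [], _ => []
  | d :: ds, [] => d :: ds
  | d :: ds, a :: as_ =>
    if d < a then d :: pvMerge ds (a :: as_)
    else if d == a then pvMerge ds as_
    else pvMerge (d :: ds) as_
termination_by ds as_ => ds.length + as_.length

def analisa_disponibilidade_alt (lista_prod_demanda : List String) (lista_prod_disponivel : List String) : List String :=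
  pvMerge (PySem.List.sorted lista_prod_demanda (fun x => x) false)
          (PySem.List.sorted lista_prod_disponivel (fun x => x) false)

-- ===== PRECONDITION & SPEC =====
def Spec_analisa_disponibilidade (lista_prod_demanda : List String) (lista_prod_disponivel : List String) (out : List String) : Prop := out = analisa_disponibilidade_alt lista_prod_demanda lista_prod_disponivel
instance (lista_prod_demanda : List String) (lista_prod_disponivel : List String) (out : List String) : Decidable (Spec_analisa_disponibilidade lista_prod_demanda lista_prod_disponivel out) := by unfold Spec_analisa_disponibilidade; infer_instance

-- ===== CLAIM (what is proved, stated in full; the proofs are below) =====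
def Claim_equal_analisa_disponibilidade : Prop := ∀ (lista_prod_demanda : List String) (lista_prod_disponivel : List String), Dom_analisa_disponibilidade lista_prod_demanda lista_prod_disponivel → Spec_analisa_disponibilidade lista_prod_demanda lista_prod_disponivel (analisa_disponibilidade lista_prod_demanda lista_prod_disponivel)

-- ===== LEMMAS AND PROOFS =====

-- A's loop as a plain recursion (result part only).
def pvLoopA : List String → List String → List String
  | [], _ => []
  | d :: ds, disp =>
    match PySem.List.remove? disp d with
    | some disp' => pvLoopA ds disp'
    | none => d :: pvLoopA ds disp

theorem pvFoldl_eq_loopA (ds : List String) : ∀ (disp acc : List String),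
    (ds.foldl (fun (st : List String × List String) x =>
      match PySem.List.remove? st.1 x with
      | some disp' => (disp', st.2)
      | none => (st.1, st.2 ++ [x])) (disp, acc)).2 = acc ++ pvLoopA ds disp := by
  induction ds with
  | nil => intro disp acc; simp [pvLoopA]
  | cons d ds ih =>
    intro disp acc
    simp only [List.foldl, pvLoopA]
    cases h : PySem.List.remove? disp d with
    | some disp' => simp [ih]
    | none => simp [ih]

theorem pvLoopA_nil_disp (ds : List String) : pvLoopA ds [] = ds := by
  induction ds with
  | nil => rfl
  | cons d ds ih => simp [pvLoopA, PySem.List.remove?, ih]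

theorem pvLoopA_skip (a : String) (ds : List String) :
    (∀ x ∈ ds, a < x) → ∀ disp, pvLoopA ds (a :: disp) = pvLoopA ds disp := by
  induction ds with
  | nil => intro _ disp; rfl
  | cons d ds ih =>
    intro h disp
    have had : a ≠ d := ne_of_lt (h d (by simp))
    have hrw := PySem.List.remove?_cons_of_ne (x := a) (v := d) disp had
    simp only [pvLoopA, hrw]
    cases hr : PySem.List.remove? disp d with
    | some disp' =>
      simp only [Option.map_some]
      exact ih (fun x hx => h x (by simp [hx])) disp'
    | none =>
      simp only [Option.map_none]
      rw [ih (fun x hx => h x (by simp [hx])) disp]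

theorem pvLoopA_eq_merge (n : ℕ) : ∀ (ds disp : List String),
    ds.length + disp.length ≤ n →
    ds.Pairwise (· ≤ ·) → disp.Pairwise (· ≤ ·) →
    pvLoopA ds disp = pvMerge ds disp := by
  induction n with
  | zero =>
    intro ds disp hn _ _
    have : ds = [] := by cases ds <;> simp_all
    subst this; simp [pvLoopA, pvMerge]
  | succ n ih =>
    intro ds disp hn hds hdisp
    cases ds with
    | nil => simp [pvLoopA, pvMerge]
    | cons d ds =>
      cases disp with
      | nil => simp [pvLoopA_nil_disp, pvLoopA, pvMerge, PySem.List.remove?]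
      | cons a as_ =>
        rcases lt_trichotomy d a with hlt | heq | hgt
        · -- d < a : d is below everything in a :: as_, so not present
          have hnot : d ∉ a :: as_ := by
            intro hm
            rcases List.mem_cons.mp hm with h | h
            · exact absurd h (ne_of_lt hlt)
            · have : a ≤ d := (List.pairwise_cons.mp hdisp).1 d h
              exact absurd hlt (not_lt.mpr this)
          have hr : PySem.List.remove? (a :: as_) d = none :=
            (PySem.List.remove?_eq_none_iff (a :: as_) d).mpr hnot
          simp only [pvLoopA, hr, pvMerge, if_pos hlt]
          congr 1
          exact ih ds (a :: as_) (by simp at hn ⊢; omega) hds.of_cons hdisp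
        · -- d = a
          subst heq
          have hr : PySem.List.remove? (d :: as_) d = some as_ :=
            PySem.List.remove?_cons_self d as_
          simp only [pvLoopA, hr, pvMerge, if_neg (lt_irrefl d), if_pos (beq_self_eq_true d)]
          exact ih ds as_ (by simp at hn ⊢; omega) hds.of_cons hdisp.of_cons
        · -- a < d : a matches nothing in d :: ds
          have hall : ∀ x ∈ d :: ds, a < x := by
            intro x hx
            rcases List.mem_cons.mp hx with h | h
            · exact h ▸ hgt
            · exact lt_of_lt_of_le hgt ((List.pairwise_cons.mp hds).1 x h)
          have hbe : (d == a) = false := by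
            simp [ne_of_gt hgt]
          simp only [pvMerge, if_neg (not_lt.mpr (le_of_lt hgt)), hbe, Bool.false_eq_true,
            if_false]
          rw [pvLoopA_skip a (d :: ds) hall as_]
          exact ih (d :: ds) as_ (by simp at hn ⊢; omega) hds hdisp.of_cons

-- ===== VERDICT (by name: the statement is the Claim_ definition above) =====
theorem analisa_disponibilidade_spec : Claim_equal_analisa_disponibilidade := by
  intro dem disp _
  unfold Spec_analisa_disponibilidade analisa_disponibilidade analisa_disponibilidade_alt
  rw [pvFoldl_eq_loopA, List.nil_append]
  exact pvLoopA_eq_merge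
    ((PySem.List.sorted dem (fun x => x) false).length +
      (PySem.List.sorted disp (fun x => x) false).length)
    _ _ le_rfl
    (PySem.List.sorted_pairwise dem (fun x => x))
    (PySem.List.sorted_pairwise disp (fun x => x))
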